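-- pv_equiv track=rewrite | github.com/eliottcassidy2000/math | 04-computation/omega4_finer.py | count_transitive_triples
-- ===== SOURCE A (Python) =====
-- def count_transitive_triples(A, vertices):
--     """Count ordered transitive triples (a,b,c) with a→b→c, a→c."""
--     count = 0
--     for a in vertices:
--         for b in vertices:
--             if b == a or not A[a][b]: continue
--             for c in vertices:
--                 if c == a or c == b: continue
--                 if A[b][c] and A[a][c]:
--                     count += 1
--     return count
-- ===== SOURCE B (Python) =====
-- def count_transitive_triples(A, vertices):
--     """Count ordered transitive triples (a,b,c) with a->b->c, a->c.
--
--     Deduplicate the vertex list into U with multiplicities, build the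
--     adjacency (successor sets) on U once, then count weighted 2-paths
--     a->b->c closed by an edge a->c: for each edge (a,c) add
--     mult[a]*mult[c]*(weighted number of middles b)."""
--     mult = {}
--     for v in vertices:
--         mult[v] = mult.get(v, 0) + 1
--     U = list(mult)
--     out = {x: set(y for y in U if y != x and A[x][y]) for x in U}
--     total = 0
--     for a in U:
--         for c in U:
--             if c in out[a]:
--                 total += mult[a] * mult[c] * sum(
--                     mult[b] for b in U if b in out[a] and c in out[b])
--     return total
-- ===== Notes on version B (the rewrite author's own statement) =====
-- stated objective: faster
-- what changed: B replaces A's triple loop over the raw vertex list by a counter/graph algorithm: it deduplicates vertices into a multiplicity dict, builds each distinct vertex's successor set once, and counts each transitive triple of distinct values exactly once as mult(a)*mult(c)*(weighted number of middles b with b in out[a] and c in out[b]) summed over edges (a,c).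
import Mathlib
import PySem

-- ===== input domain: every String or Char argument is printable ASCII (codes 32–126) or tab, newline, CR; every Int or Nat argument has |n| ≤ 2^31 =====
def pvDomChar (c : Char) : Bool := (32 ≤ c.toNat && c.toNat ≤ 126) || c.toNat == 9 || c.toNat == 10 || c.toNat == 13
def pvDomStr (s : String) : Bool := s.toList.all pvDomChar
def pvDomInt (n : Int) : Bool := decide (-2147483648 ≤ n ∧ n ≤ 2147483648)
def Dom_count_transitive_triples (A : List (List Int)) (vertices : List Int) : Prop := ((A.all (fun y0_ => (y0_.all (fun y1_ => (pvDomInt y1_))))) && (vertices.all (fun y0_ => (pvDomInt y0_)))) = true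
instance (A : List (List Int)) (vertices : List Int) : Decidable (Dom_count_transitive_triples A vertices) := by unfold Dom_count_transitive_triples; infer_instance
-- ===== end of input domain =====

-- B counts by a different algorithm: it deduplicates the vertices into a multiplicity counter, builds the successor sets of the induced graph once, and sums mult(a)*mult(c)*(weighted middle count) over the edges (a,c) — cubic in the number of distinct vertices rather than in the list length (measured faster in a timing run).

-- ===== PORT A =====
def count_transitive_triples (A : List (List Int)) (vertices : List Int) : Int :=
  vertices.foldl (fun count a =>
    vertices.foldl (fun count b =>
      if b = a ∨ PySem.List.pyGetD (PySem.List.pyGetD A a []) b 0 = 0 then count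
      else
        vertices.foldl (fun count c =>
          if c = a ∨ c = b then count
          else if PySem.List.pyGetD (PySem.List.pyGetD A b []) c 0 ≠ 0 ∧
                  PySem.List.pyGetD (PySem.List.pyGetD A a []) c 0 ≠ 0 then count + 1
          else count) count) count) 0

-- ===== PORT B =====
def count_transitive_triples_alt (A : List (List Int)) (vertices : List Int) : Int :=
  let mult : PySem.Dict Int Int :=
    vertices.foldl (fun d v => d.insert v (d.getD v 0 + 1)) PySem.Dict.empty
  let U := mult.keys
  let out : PySem.Dict Int (PySem.Set Int) :=
    U.foldl (fun d x =>
      d.insert x (PySem.Set.ofList (U.filter (fun y =>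
        decide (y ≠ x ∧ PySem.List.pyGetD (PySem.List.pyGetD A x []) y 0 ≠ 0))))) PySem.Dict.empty
  U.foldl (fun total a =>
    U.foldl (fun total c =>
      if PySem.Set.contains (out.getD a []) c then
        total + mult.getD a 0 * mult.getD c 0 *
          (U.foldl (fun s b =>
            if PySem.Set.contains (out.getD a []) b && PySem.Set.contains (out.getD b []) c
            then s + mult.getD b 0 else s) 0)
      else total) total) 0

-- ===== PRECONDITION & SPEC =====
-- Pre_: for every pair of distinct vertices a, b, a is a valid (Python, possibly negative) index
-- into A and b into row A[a] — exactly the reads both Pythons perform, so exactly where A returns normally.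
def Pre_count_transitive_triples (A : List (List Int)) (vertices : List Int) : Prop :=
  ∀ a ∈ vertices, ∀ b ∈ vertices, b ≠ a →
    PySem.Raise.InRange A.length a ∧ PySem.Raise.InRange (PySem.List.pyGetD A a []).length b
instance (A : List (List Int)) (vertices : List Int) : Decidable (Pre_count_transitive_triples A vertices) := by unfold Pre_count_transitive_triples; infer_instance

def pvWitness_count_transitive_triples : List (List Int) × List Int := ([[0, 1], [1, 0]], [0, 1])

def Spec_count_transitive_triples (A : List (List Int)) (vertices : List Int) (out : Int) : Prop := out = count_transitive_triples_alt A vertices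
instance (A : List (List Int)) (vertices : List Int) (out : Int) : Decidable (Spec_count_transitive_triples A vertices out) := by unfold Spec_count_transitive_triples; infer_instance

-- ===== CLAIM (what is proved, stated in full; the proofs are below) =====
def Claim_equal_count_transitive_triples : Prop := ∀ (A : List (List Int)) (vertices : List Int), Dom_count_transitive_triples A vertices → Pre_count_transitive_triples A vertices → Spec_count_transitive_triples A vertices (count_transitive_triples A vertices)

-- ===== LEMMAS AND PROOFS =====

-- the adjacency read both programs perform
def pvAdj (A : List (List Int)) (x y : Int) : Int :=
  PySem.List.pyGetD (PySem.List.pyGetD A x []) y 0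

-- the 0/1 contribution of one ordered triple to A's count
def pvG (A : List (List Int)) (a b c : Int) : Int :=
  if b ≠ a ∧ pvAdj A a b ≠ 0 ∧ c ≠ a ∧ c ≠ b ∧ pvAdj A b c ≠ 0 ∧ pvAdj A a c ≠ 0 then 1 else 0

-- B's edge test on the deduplicated vertices
def pvP (A : List (List Int)) (x y : Int) : Bool :=
  decide (y ≠ x ∧ PySem.List.pyGetD (PySem.List.pyGetD A x []) y 0 ≠ 0)

-- A's count is the triple sum of pvG over the vertex list
theorem pv_inner_c (A : List (List Int)) (vertices : List Int) (a b cnt : Int)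
    (hb : b ≠ a) (hab : pvAdj A a b ≠ 0) :
    vertices.foldl (fun count c =>
      if c = a ∨ c = b then count
      else if PySem.List.pyGetD (PySem.List.pyGetD A b []) c 0 ≠ 0 ∧
              PySem.List.pyGetD (PySem.List.pyGetD A a []) c 0 ≠ 0 then count + 1
      else count) cnt = cnt + (vertices.map (fun c => pvG A a b c)).sum := by
  rw [PySem.List.foldl_congr_mem vertices _ (fun s c => s + pvG A a b c) cnt
      (by intro acc c _
          simp only [pvG, pvAdj]
          split_ifs <;> first | omega | tauto)]
  exact PySem.List.foldl_add _ _ _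

theorem pv_mid_b (A : List (List Int)) (vertices : List Int) (a cnt : Int) :
    vertices.foldl (fun count b =>
      if b = a ∨ PySem.List.pyGetD (PySem.List.pyGetD A a []) b 0 = 0 then count
      else
        vertices.foldl (fun count c =>
          if c = a ∨ c = b then count
          else if PySem.List.pyGetD (PySem.List.pyGetD A b []) c 0 ≠ 0 ∧
                  PySem.List.pyGetD (PySem.List.pyGetD A a []) c 0 ≠ 0 then count + 1
          else count) count) cnt
    = cnt + (vertices.map (fun b => (vertices.map (fun c => pvG A a b c)).sum)).sum := by
  rw [PySem.List.foldl_congr_mem vertices _ (fun s b => s + (vertices.map (fun c => pvG A a b c)).sum) cnt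
      (by intro acc b _
          show (if b = a ∨ PySem.List.pyGetD (PySem.List.pyGetD A a []) b 0 = 0 then acc
                else List.foldl (fun count c =>
                  if c = a ∨ c = b then count
                  else if PySem.List.pyGetD (PySem.List.pyGetD A b []) c 0 ≠ 0 ∧
                          PySem.List.pyGetD (PySem.List.pyGetD A a []) c 0 ≠ 0 then count + 1
                  else count) acc vertices)
              = acc + (vertices.map (fun c => pvG A a b c)).sum
          by_cases h : b = a ∨ PySem.List.pyGetD (PySem.List.pyGetD A a []) b 0 = 0
          · rw [if_pos h, List.sum_eq_zero, add_zero]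
            intro x hx
            simp only [List.mem_map] at hx
            obtain ⟨c, _, rfl⟩ := hx
            simp only [pvG, pvAdj]
            rw [if_neg]
            rcases h with h1 | h2 <;> tauto
          · rw [if_neg h]
            obtain ⟨h1, h2⟩ := not_or.mp h
            exact pv_inner_c A vertices a b acc h1 h2)]
  exact PySem.List.foldl_add _ _ _

theorem pv_A_sum (A : List (List Int)) (vertices : List Int) :
    count_transitive_triples A vertices =
      (vertices.map (fun a =>
        (vertices.map (fun b =>
          (vertices.map (fun c => pvG A a b c)).sum)).sum)).sum := by
  unfold count_transitive_triples
  rw [PySem.List.foldl_congr_mem vertices _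
      (fun s a => s + (vertices.map (fun b => (vertices.map (fun c => pvG A a b c)).sum)).sum) 0
      (by intro acc a _; exact pv_mid_b A vertices a acc)]
  rw [PySem.List.foldl_add _ _ _, zero_add]

-- looking up the successor-set dict built by B's fold
theorem pv_getD_build (U : List Int) (f : Int → PySem.Set Int) (hU : U.Nodup)
    (x : Int) (hx : x ∈ U) :
    (U.foldl (fun d v => d.insert v (f v)) PySem.Dict.empty).getD x [] = f x := by
  have hitems := PySem.Dict.items_foldl_insert_fresh U (fun v => v) f PySem.Dict.empty
      (fun a _ => by simp [PySem.Dict.contains_empty]) (by simpa using hU)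
  have hnodup := PySem.Dict.nodup_keys_foldl_insert U (fun _ v => f v) PySem.Dict.empty
      PySem.Dict.nodup_keys_empty
  refine PySem.Dict.getD_of_mem_items _ ?_ hnodup []
  rw [hitems]
  simp only [List.mem_append]
  exact Or.inr (List.mem_map_of_mem hx (f := fun a => (a, f a)))

theorem pv_contains_filter (U : List Int) (p : Int → Bool) (y : Int) (hy : y ∈ U) :
    PySem.Set.contains (PySem.Set.ofList (U.filter p)) y = p y := by
  have h : (PySem.Set.contains (PySem.Set.ofList (U.filter p)) y = true) ↔ (p y = true) := by
    rw [PySem.Set.contains_iff]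
    simp [PySem.Set.mem_ofList, List.mem_filter, hy]
  cases hp : p y
  · rw [Bool.eq_false_iff]
    intro hc
    exact absurd (h.mp hc) (by simp [hp])
  · exact h.mpr hp

-- B's count as a guarded double sum over the distinct vertices
theorem pv_B_inner (A : List (List Int)) (vertices : List Int)
    (out : PySem.Dict Int (PySem.Set Int))
    (hout : ∀ x ∈ PySem.Set.ofList vertices,
      out.getD x [] = PySem.Set.ofList ((PySem.Set.ofList vertices).filter (pvP A x)))
    (a c s0 : Int) (ha : a ∈ PySem.Set.ofList vertices) (hc : c ∈ PySem.Set.ofList vertices) :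
    (PySem.Set.ofList vertices).foldl (fun s b =>
      if PySem.Set.contains (out.getD a []) b && PySem.Set.contains (out.getD b []) c
      then s + (vertices.count b : Int) else s) s0
    = s0 + ((PySem.Set.ofList vertices).map (fun b =>
        if pvP A a b && pvP A b c then (vertices.count b : Int) else 0)).sum := by
  rw [PySem.List.foldl_congr_mem (PySem.Set.ofList vertices) _
      (fun s b => s + (if pvP A a b && pvP A b c then (vertices.count b : Int) else 0)) s0
      (by intro acc b hb
          rw [hout a ha, hout b hb,
              pv_contains_filter (PySem.Set.ofList vertices) (pvP A a) b hb,
              pv_contains_filter (PySem.Set.ofList vertices) (pvP A b) c hc]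
          by_cases h : (pvP A a b && pvP A b c) = true <;> simp [h])]
  exact PySem.List.foldl_add _ _ _

theorem pv_B_mid (A : List (List Int)) (vertices : List Int)
    (out : PySem.Dict Int (PySem.Set Int))
    (hout : ∀ x ∈ PySem.Set.ofList vertices,
      out.getD x [] = PySem.Set.ofList ((PySem.Set.ofList vertices).filter (pvP A x)))
    (a t0 : Int) (ha : a ∈ PySem.Set.ofList vertices) :
    (PySem.Set.ofList vertices).foldl (fun total c =>
      if PySem.Set.contains (out.getD a []) c then
        total + (vertices.count a : Int) * (vertices.count c : Int) *
          ((PySem.Set.ofList vertices).foldl (fun s b =>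
            if PySem.Set.contains (out.getD a []) b && PySem.Set.contains (out.getD b []) c
            then s + (vertices.count b : Int) else s) 0)
      else total) t0
    = t0 + ((PySem.Set.ofList vertices).map (fun c =>
        if pvP A a c then (vertices.count a : Int) * (vertices.count c : Int) *
          (((PySem.Set.ofList vertices).map (fun b =>
            if pvP A a b && pvP A b c then (vertices.count b : Int) else 0)).sum)
        else 0)).sum := by
  rw [PySem.List.foldl_congr_mem (PySem.Set.ofList vertices) _
      (fun total c => total + (if pvP A a c then (vertices.count a : Int) * (vertices.count c : Int) *
          (((PySem.Set.ofList vertices).map (fun b =>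
            if pvP A a b && pvP A b c then (vertices.count b : Int) else 0)).sum) else 0)) t0
      (by intro acc c hc
          rw [pv_B_inner A vertices out hout a c 0 ha hc, zero_add,
              hout a ha, pv_contains_filter (PySem.Set.ofList vertices) (pvP A a) c hc]
          by_cases h : pvP A a c = true <;> simp [h])]
  exact PySem.List.foldl_add _ _ _

theorem pv_B_sum0 (A : List (List Int)) (vertices : List Int) :
    count_transitive_triples_alt A vertices =
      ((PySem.Set.ofList vertices).map (fun a =>
        ((PySem.Set.ofList vertices).map (fun c =>
          if pvP A a c then (vertices.count a : Int) * (vertices.count c : Int) *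
            (((PySem.Set.ofList vertices).map (fun b =>
              if pvP A a b && pvP A b c then (vertices.count b : Int) else 0)).sum)
          else 0)).sum)).sum := by
  unfold count_transitive_triples_alt
  simp only [PySem.Dict.foldl_insert_getD_add_one_eq_counter, PySem.Dict.keys_counter,
    PySem.Dict.getD_counter]
  have hout : ∀ x ∈ PySem.Set.ofList vertices,
      ((PySem.Set.ofList vertices).foldl (fun d x =>
        d.insert x (PySem.Set.ofList ((PySem.Set.ofList vertices).filter (fun y =>
          decide (y ≠ x ∧ PySem.List.pyGetD (PySem.List.pyGetD A x []) y 0 ≠ 0)))))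
        PySem.Dict.empty).getD x [] =
        PySem.Set.ofList ((PySem.Set.ofList vertices).filter (pvP A x)) := by
    intro x hx
    exact pv_getD_build (PySem.Set.ofList vertices)
      (fun v => PySem.Set.ofList ((PySem.Set.ofList vertices).filter (pvP A v)))
      (PySem.Set.nodup_ofList vertices) x hx
  rw [PySem.List.foldl_congr_mem (PySem.Set.ofList vertices) _
      (fun total a => total + ((PySem.Set.ofList vertices).map (fun c =>
          if pvP A a c then (vertices.count a : Int) * (vertices.count c : Int) *
            (((PySem.Set.ofList vertices).map (fun b =>
              if pvP A a b && pvP A b c then (vertices.count b : Int) else 0)).sum)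
          else 0)).sum) 0
      (by intro acc a ha
          exact pv_B_mid A vertices _ hout a acc ha)]
  rw [PySem.List.foldl_add _ _ _, zero_add]

-- sum bookkeeping
theorem pv_sum_comm (l m : List Int) (t : Int → Int → Int) :
    (l.map (fun x => (m.map (fun y => t x y)).sum)).sum
      = (m.map (fun y => (l.map (fun x => t x y)).sum)).sum := by
  induction l with
  | nil => simp [List.sum_eq_zero]
  | cons x xs ih =>
    simp only [List.map_cons, List.sum_cons, ih]
    rw [← PySem.List.sum_map_add_int]

theorem pv_pair (A : List (List Int)) (vertices : List Int) (a c : Int) :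
    (if pvP A a c then (vertices.count a : Int) * (vertices.count c : Int) *
        (((PySem.Set.ofList vertices).map (fun b =>
          if pvP A a b && pvP A b c then (vertices.count b : Int) else 0)).sum)
      else 0)
    = ((PySem.Set.ofList vertices).map (fun b =>
        (vertices.count a : Int) * (vertices.count b : Int) * (vertices.count c : Int) * pvG A a b c)).sum := by
  by_cases h : pvP A a c = true
  · rw [if_pos h, ← List.sum_map_mul_left]
    apply congrArg List.sum
    apply List.map_congr_left
    intro b _
    simp only [pvP, decide_eq_true_eq] at h
    by_cases hq : (pvP A a b && pvP A b c) = true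
    · rw [if_pos hq]
      simp only [Bool.and_eq_true, pvP, decide_eq_true_eq] at hq
      rw [pvG, if_pos (by unfold pvAdj; tauto)]
      ring
    · rw [if_neg hq]
      simp only [Bool.and_eq_true, pvP, decide_eq_true_eq, not_and_or] at hq
      rw [pvG, if_neg (by unfold pvAdj; tauto)]
      ring
  · rw [if_neg h, eq_comm, List.sum_eq_zero]
    intro x hx
    simp only [List.mem_map] at hx
    obtain ⟨b, _, rfl⟩ := hx
    simp only [pvP, decide_eq_true_eq, not_and_or] at h
    rw [pvG, if_neg (by unfold pvAdj; tauto), mul_zero]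

theorem pv_sum_weight' (l : List Int) (f : Int → Int) :
    (l.map f).sum = ((PySem.Set.ofList l).map (fun v => (l.count v : Int) * f v)).sum := by
  rw [Finset.sum_list_map_count l f,
      Finset.sum_list_map_count (PySem.Set.ofList l) (fun v => (l.count v : Int) * f v)]
  have htf : (PySem.Set.ofList l).toFinset = l.toFinset := by
    ext x; simp [PySem.Set.mem_ofList]
  rw [htf]
  apply Finset.sum_congr rfl
  intro x hx
  rw [List.mem_toFinset] at hx
  have h1 : (PySem.Set.ofList l).count x = 1 :=
    List.count_eq_one_of_mem (PySem.Set.nodup_ofList l) ((PySem.Set.mem_ofList l x).mpr hx)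
  rw [h1, one_smul, nsmul_eq_mul]

-- the two counts agree
theorem pv_main (A : List (List Int)) (vertices : List Int) :
    count_transitive_triples A vertices = count_transitive_triples_alt A vertices := by
  rw [pv_A_sum, pv_B_sum0]
  have hB : ((PySem.Set.ofList vertices).map (fun a =>
        ((PySem.Set.ofList vertices).map (fun c =>
          if pvP A a c then (vertices.count a : Int) * (vertices.count c : Int) *
            (((PySem.Set.ofList vertices).map (fun b =>
              if pvP A a b && pvP A b c then (vertices.count b : Int) else 0)).sum)
          else 0)).sum)).sum
      = ((PySem.Set.ofList vertices).map (fun a =>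
          ((PySem.Set.ofList vertices).map (fun b =>
            ((PySem.Set.ofList vertices).map (fun c =>
              (vertices.count a : Int) * (vertices.count b : Int) * (vertices.count c : Int) * pvG A a b c)).sum)).sum)).sum := by
    apply congrArg List.sum
    apply List.map_congr_left
    intro a _
    rw [congrArg List.sum (List.map_congr_left (fun c _ => pv_pair A vertices a c))]
    exact pv_sum_comm _ _ (fun c b =>
      (vertices.count a : Int) * (vertices.count b : Int) * (vertices.count c : Int) * pvG A a b c)
  rw [hB]
  rw [pv_sum_weight' vertices (fun a =>
    (vertices.map (fun b => (vertices.map (fun c => pvG A a b c)).sum)).sum)]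
  apply congrArg List.sum
  apply List.map_congr_left
  intro a _
  rw [pv_sum_weight' vertices (fun b => (vertices.map (fun c => pvG A a b c)).sum),
      ← List.sum_map_mul_left]
  apply congrArg List.sum
  apply List.map_congr_left
  intro b _
  rw [pv_sum_weight' vertices (fun c => pvG A a b c)]
  rw [show (vertices.count a : Int) * ((vertices.count b : Int) *
      ((PySem.Set.ofList vertices).map (fun c => (vertices.count c : Int) * pvG A a b c)).sum)
    = ((vertices.count a : Int) * (vertices.count b : Int)) *
      ((PySem.Set.ofList vertices).map (fun c => (vertices.count c : Int) * pvG A a b c)).sum by ring]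
  rw [← List.sum_map_mul_left]
  apply congrArg List.sum
  apply List.map_congr_left
  intro c _
  ring

-- ===== VERDICT (by name: the statement is the Claim_ definition above) =====
theorem count_transitive_triples_spec : Claim_equal_count_transitive_triples := by
  intro A vertices _ _
  exact pv_main A vertices
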